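-- pv_equiv track=rewrite | github.com/Trance-0/Flow-of-Thoughts | prg.py | rsa_pseudo_random_generator
-- ===== SOURCE A (Python) =====
-- def modinv(a, m):
--     m0, x0, x1 = m, 0, 1
--     if m == 1:
--         return 0
--     while a > 1:
--         q = a // m
--         m, a = a % m, m
--         x0, x1 = x1 - q * x0, x0
--     if x1 < 0:
--         x1 += m0
--     return x1
--
-- def rsa_pseudo_random_generator(seed, n_bits):
--     p = 61
--     q = 53
--     n = p * q
--     e = 17
--     d = modinv(e, (p-1)*(q-1))
--     x = seed
--     random_bits = []
--     for _ in range(n_bits):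
--         x = pow(x, e, n)
--         random_bits.append(x % 2)
--     return random_bits
-- ===== SOURCE B (Python) =====
-- def rsa_pseudo_random_generator(seed, n_bits):
--     # Cycle detection: the state sequence x -> pow(x, e, n) is eventually periodic
--     # inside [0, n); once a state repeats, the remaining bits are copied from the
--     # already-emitted prefix instead of doing further modular exponentiations.
--     n = 3233  # 61 * 53
--     e = 17
--     bits = []
--     seen = {}
--     x = seed
--     i = 0
--     while i < n_bits:
--         x = pow(x, e, n)
--         if x in seen:
--             s = seen[x]
--             L = i - s
--             while i < n_bits:
--                 bits.append(bits[s + (i - s) % L])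
--                 i += 1
--             break
--         seen[x] = i
--         bits.append(x % 2)
--         i += 1
--     return bits
-- ===== Notes on version B (the rewrite author's own statement) =====
-- stated objective: faster
-- what changed: B detects the first repeated internal RSA state with a state->index dict and then fills all remaining bits by copying from the already-emitted pre-period/cycle, so it performs at most ~3233 modular exponentiations regardless of n_bits, instead of A's one pow per bit.
import Mathlib
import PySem

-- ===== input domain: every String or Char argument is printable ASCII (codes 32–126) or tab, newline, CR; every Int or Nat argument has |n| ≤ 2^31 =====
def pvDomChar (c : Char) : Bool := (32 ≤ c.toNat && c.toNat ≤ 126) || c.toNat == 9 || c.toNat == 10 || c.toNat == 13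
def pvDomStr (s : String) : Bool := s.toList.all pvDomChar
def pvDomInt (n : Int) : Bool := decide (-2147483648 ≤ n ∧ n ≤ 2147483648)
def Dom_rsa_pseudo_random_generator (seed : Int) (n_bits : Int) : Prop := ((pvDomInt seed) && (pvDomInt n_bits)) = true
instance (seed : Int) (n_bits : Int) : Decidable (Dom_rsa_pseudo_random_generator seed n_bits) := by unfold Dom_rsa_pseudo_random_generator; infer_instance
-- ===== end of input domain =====

-- B replaces A's pow-per-bit loop by cycle detection on the RSA state (state->index dict),
-- copying all bits after the first repeated state from the already-emitted prefix: faster (boundedly many pows).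

-- ===== PORT A =====
-- port of modinv's while-loop; fuel only makes the recursion total, the call A makes never exhausts it
def pvModinvGo (fuel : Nat) (a m x0 x1 : Int) : Int :=
  match fuel with
  | 0 => x1
  | f + 1 =>
    if a > 1 then
      let qq := PySem.Int.floordiv a m
      pvModinvGo f m (PySem.Int.mod a m) (x1 - qq * x0) x0
    else x1

def pvModinv (a m : Int) : Int :=
  let m0 := m
  if m = 1 then 0
  else
    let x1 := pvModinvGo (a.toNat + m.toNat + 1) a m 0 1
    if x1 < 0 then x1 + m0 else x1

def rsa_pseudo_random_generator (seed : Int) (n_bits : Int) : List Int :=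
  let p : Int := 61
  let q : Int := 53
  let n : Int := p * q
  let _d := pvModinv 17 ((p - 1) * (q - 1))
  ((PySem.List.pyRange 0 n_bits 1).foldl
    (fun (st : Int × List Int) _ =>
      let x := PySem.Int.powMod st.1 17 n
      (x, st.2 ++ [PySem.Int.mod x 2]))
    (seed, [])).2

-- ===== PORT B =====
-- the inner fill loop: bits.append(bits[s + (i - s) % L]); the index is always in range, getD 0 only totalizes
def pvFill (fuel : Nat) (i n_bits s L : Int) (bits : List Int) : List Int :=
  match fuel with
  | 0 => bits
  | f + 1 =>
    if i < n_bits then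
      let b := (PySem.List.pyGet? bits (s + PySem.Int.mod (i - s) L)).getD 0
      pvFill f (i + 1) n_bits s L (bits ++ [b])
    else bits

-- the main while loop; fuel n_bits.toNat is exactly the maximal number of iterations
def pvGen (fuel : Nat) (i n_bits x : Int) (seen : PySem.Dict Int Int) (bits : List Int) : List Int :=
  match fuel with
  | 0 => bits
  | f + 1 =>
    if i < n_bits then
      let x' := PySem.Int.powMod x 17 3233
      match PySem.Dict.get? seen x' with
      | some s => pvFill (f + 1) i n_bits s (i - s) bits
      | none => pvGen f (i + 1) n_bits x' (PySem.Dict.insert seen x' i) (bits ++ [PySem.Int.mod x' 2])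
    else bits

def rsa_pseudo_random_generator_alt (seed : Int) (n_bits : Int) : List Int :=
  pvGen n_bits.toNat 0 n_bits seed PySem.Dict.empty []

-- ===== PRECONDITION & SPEC =====
def Spec_rsa_pseudo_random_generator (seed : Int) (n_bits : Int) (out : List Int) : Prop := out = rsa_pseudo_random_generator_alt seed n_bits
instance (seed : Int) (n_bits : Int) (out : List Int) : Decidable (Spec_rsa_pseudo_random_generator seed n_bits out) := by unfold Spec_rsa_pseudo_random_generator; infer_instance

-- ===== CLAIM (what is proved, stated in full; the proofs are below) =====
def Claim_equal_rsa_pseudo_random_generator : Prop := ∀ (seed : Int) (n_bits : Int), Dom_rsa_pseudo_random_generator seed n_bits → Spec_rsa_pseudo_random_generator seed n_bits (rsa_pseudo_random_generator seed n_bits)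

-- ===== LEMMAS AND PROOFS =====

-- the state-update map and the pure state/bit sequences both programs compute
def pvF (x : Int) : Int := PySem.Int.powMod x 17 3233
def pvSt (seed : Int) (k : Nat) : Int := pvF^[k] seed
def pvG (seed : Int) (k : Nat) : Int := PySem.Int.mod (pvSt seed (k + 1)) 2

lemma pvFoldA (l : List Int) : ∀ (x : Int) (acc : List Int),
    (l.foldl (fun (st : Int × List Int) _ =>
        (pvF st.1, st.2 ++ [PySem.Int.mod (pvF st.1) 2])) (x, acc)).2
      = acc ++ (List.range l.length).map (fun k => PySem.Int.mod (pvF^[k + 1] x) 2) := by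
  induction l with
  | nil => intro x acc; simp
  | cons a t ih =>
    intro x acc
    simp only [List.foldl_cons, ih, List.length_cons, List.range_succ_eq_map, List.map_cons,
      List.map_map]
    simp [Function.comp_def, Function.iterate_succ_apply, List.append_assoc]

lemma pvA_eq (seed n_bits : Int) :
    rsa_pseudo_random_generator seed n_bits = (List.range n_bits.toNat).map (pvG seed) := by
  unfold rsa_pseudo_random_generator
  have h : (fun (st : Int × List Int) (_ : Int) =>
      let x := PySem.Int.powMod st.1 17 ((61:Int) * 53)
      (x, st.2 ++ [PySem.Int.mod x 2]))
    = (fun (st : Int × List Int) _ => (pvF st.1, st.2 ++ [PySem.Int.mod (pvF st.1) 2])) := by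
    funext st _; norm_num [pvF]
  simp only [h, pvFoldA, PySem.List.length_pyRange_one, List.nil_append]
  simp [pvG, pvSt]


lemma pvPeriodAux (z : Int) (s L : Nat) (h : pvF^[s + L] z = pvF^[s] z) :
    ∀ m, s ≤ m → pvF^[m + L] z = pvF^[m] z := by
  intro m hm
  obtain ⟨t, rfl⟩ : ∃ t, m = s + t := ⟨m - s, by omega⟩
  have e1 : s + t + L = t + (s + L) := by omega
  have e2 : s + t = t + s := by omega
  rw [e1, e2, Function.iterate_add_apply pvF t (s + L), h, ← Function.iterate_add_apply]

lemma pvPeriod (z : Int) (s L : Nat) (hL : 0 < L) (h : pvF^[s + L] z = pvF^[s] z) :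
    ∀ k, s ≤ k → pvF^[k] z = pvF^[s + (k - s) % L] z := by
  intro k
  induction k using Nat.strong_induction_on with
  | _ k ih =>
    intro hk
    by_cases hlt : k < s + L
    · have : (k - s) % L = k - s := Nat.mod_eq_of_lt (by omega)
      rw [this]
      congr 1
      omega
    · have hkL : s ≤ k - L := by omega
      have h1 : pvF^[k] z = pvF^[k - L] z := by
        have := pvPeriodAux z s L h (k - L) hkL
        rwa [Nat.sub_add_cancel (by omega)] at this
      have hmod : (k - s) % L = (k - L - s) % L := by
        have h3 : k - s = (k - L - s) + L := by omega
        rw [h3, Nat.add_mod_right]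
      rw [h1, ih (k - L) (by omega) hkL, hmod]

lemma pvFillLem (seed n_bits : Int) (s L : Nat) (hL : 0 < L)
    (hg : ∀ k, s + 1 ≤ k → pvG seed k = pvG seed (s + (k - s) % L)) :
    ∀ (fuel i : Nat), fuel + i = n_bits.toNat → s + L ≤ i →
    pvFill fuel (i : Int) n_bits (s : Int) (L : Int) ((List.range i).map (pvG seed))
      = (List.range n_bits.toNat).map (pvG seed) := by
  intro fuel
  induction fuel with
  | zero =>
    intro i hfi _
    have : i = n_bits.toNat := by omega
    simp [pvFill, this]
  | succ f ih =>
    intro i hfi hsi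
    have hi : (i : Int) < n_bits := by omega
    have hcast : (i : Int) - (s : Int) = ((i - s : Nat) : Int) := by omega
    have hm : s + (i - s) % L < i := by
      have := Nat.mod_lt (i - s) hL
      omega
    have hidx : (PySem.List.pyGet? ((List.range i).map (pvG seed))
        ((s : Int) + PySem.Int.mod ((i : Int) - (s : Int)) (L : Int))).getD 0
        = pvG seed (s + (i - s) % L) := by
      rw [hcast]
      rw [show ((s : Int) + PySem.Int.mod ((i - s : Nat) : Int) ((L : Nat) : Int))
            = ((s + (i - s) % L : Nat) : Int) by
        rw [PySem.Int.mod_natCast]; push_cast; ring]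
      rw [PySem.List.pyGet?_natCast]
      simp [List.getElem?_map, List.getElem?_range hm]
    have hgi : pvG seed (s + (i - s) % L) = pvG seed i := (hg i (by omega)).symm
    show pvFill (f + 1) (i : Int) n_bits (s : Int) (L : Int) ((List.range i).map (pvG seed))
        = (List.range n_bits.toNat).map (pvG seed)
    rw [pvFill]
    simp only [if_pos hi, hidx, hgi]
    have happ : (List.range i).map (pvG seed) ++ [pvG seed i]
        = (List.range (i + 1)).map (pvG seed) := by
      simp [List.range_succ]
    rw [happ, show (i : Int) + 1 = ((i + 1 : Nat) : Int) by push_cast; ring]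
    exact ih (i + 1) (by omega) (by omega)

lemma pvGenLem (seed n_bits : Int) : ∀ (fuel i : Nat) (seen : PySem.Dict Int Int),
    fuel + i = n_bits.toNat →
    (∀ j, j < i → seen.get? (pvSt seed (j + 1)) = some (j : Int)) →
    (∀ y v, seen.get? y = some v → ∃ j, j < i ∧ y = pvSt seed (j + 1) ∧ v = (j : Int)) →
    pvGen fuel (i : Int) n_bits (pvSt seed i) seen ((List.range i).map (pvG seed))
      = (List.range n_bits.toNat).map (pvG seed) := by
  intro fuel
  induction fuel with
  | zero =>
    intro i seen hfi _ _
    have : i = n_bits.toNat := by omega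
    simp [pvGen, this]
  | succ f ih =>
    intro i seen hfi h1 h2
    have hi : (i : Int) < n_bits := by omega
    have hx' : PySem.Int.powMod (pvSt seed i) 17 3233 = pvSt seed (i + 1) := by
      simp [pvSt, Function.iterate_succ_apply', pvF]
    rw [pvGen]
    simp only [if_pos hi, hx']
    cases hlook : PySem.Dict.get? seen (pvSt seed (i + 1)) with
    | none =>
      -- fresh state: record it and continue
      have h1' : ∀ j, j < i + 1 →
          (seen.insert (pvSt seed (i + 1)) (i : Int)).get? (pvSt seed (j + 1)) = some (j : Int) := by
        intro j hj
        by_cases hji : j = i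
        · subst hji; simp [PySem.Dict.get?_insert_self]
        · have hjlt : j < i := by omega
          have hne : pvSt seed (j + 1) ≠ pvSt seed (i + 1) := by
            intro heq
            have hx := h1 j hjlt
            rw [heq, hlook] at hx
            simp at hx
          rw [PySem.Dict.get?_insert_of_ne _ _ hne]
          exact h1 j hjlt
      have h2' : ∀ y v, (seen.insert (pvSt seed (i + 1)) (i : Int)).get? y = some v →
          ∃ j, j < i + 1 ∧ y = pvSt seed (j + 1) ∧ v = (j : Int) := by
        intro y v hy
        rw [PySem.Dict.get?_insert] at hy
        split_ifs at hy with heq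
        · exact ⟨i, by omega, heq, by simpa using hy.symm⟩
        · obtain ⟨j, hj, hy1, hy2⟩ := h2 y v hy
          exact ⟨j, by omega, hy1, hy2⟩
      have happ : (List.range i).map (pvG seed) ++ [PySem.Int.mod (pvSt seed (i + 1)) 2]
          = (List.range (i + 1)).map (pvG seed) := by
        simp [List.range_succ, pvG]
      rw [happ, show (i : Int) + 1 = ((i + 1 : Nat) : Int) by push_cast; ring]
      exact ih (i + 1) _ (by omega) h1' h2'
    | some sv =>
      -- repeated state: fill the rest from the cycle
      obtain ⟨j, hji, hst, hsv⟩ := h2 _ _ hlook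
      subst hsv
      have hjcast : (i : Int) - (j : Int) = ((i - j : Nat) : Int) := by omega
      have hLpos : 0 < i - j := by omega
      have hper : pvF^[(j + 1) + (i - j)] seed = pvF^[j + 1] seed := by
        have : (j + 1) + (i - j) = i + 1 := by omega
        rw [this]
        simpa [pvSt] using hst
      have hg : ∀ k, j + 1 ≤ k → pvG seed k = pvG seed (j + (k - j) % (i - j)) := by
        intro k hk
        have hp := pvPeriod seed (j + 1) (i - j) hLpos hper (k + 1) (by omega)
        have hkk : (k + 1) - (j + 1) = k - j := by omega
        rw [hkk] at hp
        have hexp : (j + 1) + (k - j) % (i - j) = (j + (k - j) % (i - j)) + 1 := by omega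
        rw [hexp] at hp
        unfold pvG pvSt
        rw [hp]
      have hres := pvFillLem seed n_bits j (i - j) hLpos hg (f + 1) i (by omega) (by omega)
      rw [← hjcast] at hres
      exact hres

lemma pvB_eq (seed n_bits : Int) :
    rsa_pseudo_random_generator_alt seed n_bits = (List.range n_bits.toNat).map (pvG seed) := by
  unfold rsa_pseudo_random_generator_alt
  have := pvGenLem seed n_bits n_bits.toNat 0 PySem.Dict.empty (by omega)
    (by intro j hj; omega)
    (by intro y v hy; simp [PySem.Dict.get?_empty] at hy)
  simpa [pvSt] using this

-- ===== VERDICT (by name: the statement is the Claim_ definition above) =====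
theorem rsa_pseudo_random_generator_spec : Claim_equal_rsa_pseudo_random_generator := by
  intro seed n_bits _
  unfold Spec_rsa_pseudo_random_generator
  rw [pvA_eq, pvB_eq]
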